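-- pv_equiv track=rewrite | github.com/AlexandroZP/MandarEmail | checking.py | double_list_check
-- ===== SOURCE A (Python) =====
-- def double_list_check(list1, list2):
--     checked = False
--     element = ''
--     for f_check in list1:
--         for s_check in list2:
--             if f_check == s_check:
--                 list2.remove(s_check)
--                 break
--     return (list2, checked, element)
-- ===== SOURCE B (Python) =====
-- def double_list_check(list1, list2):
--     # Counter-based O(n+m) version; like A it mutates list2 in place
--     # and returns (list2, False, '').
--     need = {}
--     for x in list1:
--         need[x] = need.get(x, 0) + 1
--     kept = []
--     for x in list2:
--         c = need.get(x, 0)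
--         if c:
--             need[x] = c - 1
--         else:
--             kept.append(x)
--     list2[:] = kept
--     return (list2, False, '')
-- ===== Notes on version B (the rewrite author's own statement) =====
-- stated objective: faster
-- what changed: Replaced the nested scan-and-remove over list2 for each element of list1 by a hash counter of list1 built once plus a single pass over list2 that skips each value as many times as it was counted.
import Mathlib
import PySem

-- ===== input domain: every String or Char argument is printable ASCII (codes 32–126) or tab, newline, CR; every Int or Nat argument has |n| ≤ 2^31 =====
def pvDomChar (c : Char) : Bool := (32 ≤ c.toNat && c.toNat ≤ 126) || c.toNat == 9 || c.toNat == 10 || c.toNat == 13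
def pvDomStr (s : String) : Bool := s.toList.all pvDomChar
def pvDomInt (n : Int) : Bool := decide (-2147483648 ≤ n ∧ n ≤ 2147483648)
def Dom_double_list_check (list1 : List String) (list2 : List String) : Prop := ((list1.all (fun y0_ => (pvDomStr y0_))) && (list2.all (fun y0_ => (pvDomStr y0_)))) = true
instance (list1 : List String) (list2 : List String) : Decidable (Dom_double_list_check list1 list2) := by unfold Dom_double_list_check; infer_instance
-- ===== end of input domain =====

-- B replaces A's nested scan-and-remove by a counter of list1 and one pass over list2 (asymptotically faster);
-- A mutates list2 in place and B performs the same mutation; the theorems here are about the return value.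

-- ===== PORT A =====
-- inner 'for s_check in list2: if f_check == s_check: list2.remove(s_check); break'
-- (the element removed is the first match found, i.e. the first occurrence of f_check)
def pyInnerScanRemove (f : String) : List String → List String
  | [] => []
  | s :: rest => if f == s then rest else s :: pyInnerScanRemove f rest

def double_list_check (list1 : List String) (list2 : List String) : List String × Bool × String :=
  (list1.foldl (fun acc f => pyInnerScanRemove f acc) list2, false, "")

-- ===== PORT B =====
-- one step of B's single pass over list2: skip x if still needed, else keep it
def bStep (st : PySem.Dict String Int × List String) (x : String) :
    PySem.Dict String Int × List String :=
  let c := st.1.getD x 0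
  if c ≠ 0 then (st.1.insert x (c - 1), st.2) else (st.1, st.2 ++ [x])

def double_list_check_alt (list1 : List String) (list2 : List String) : List String × Bool × String :=
  let need : PySem.Dict String Int := list1.foldl (fun d x => d.insert x (d.getD x 0 + 1)) PySem.Dict.empty
  let res := list2.foldl bStep (need, [])
  (res.2, false, "")

-- ===== PRECONDITION & SPEC =====
def Spec_double_list_check (list1 : List String) (list2 : List String) (out : List String × Bool × String) : Prop := out = double_list_check_alt list1 list2
instance (list1 : List String) (list2 : List String) (out : List String × Bool × String) : Decidable (Spec_double_list_check list1 list2 out) := by unfold Spec_double_list_check; infer_instance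

-- ===== CLAIM (what is proved, stated in full; the proofs are below) =====
def Claim_equal_double_list_check : Prop := ∀ (list1 : List String) (list2 : List String), Dom_double_list_check list1 list2 → Spec_double_list_check list1 list2 (double_list_check list1 list2)

-- ===== LEMMAS AND PROOFS =====

-- abstract one-pass skip with a Nat counter
def filtCnt (c : String → Nat) : List String → List String
  | [] => []
  | x :: rest =>
      if c x ≠ 0 then filtCnt (fun y => if y = x then c y - 1 else c y) rest
      else x :: filtCnt c rest

theorem filtCnt_zero (l : List String) : filtCnt (fun _ => 0) l = l := by
  induction l with
  | nil => rfl
  | cons x rest ih => simp [filtCnt, ih]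

theorem filtCnt_congr {c c' : String → Nat} (h : ∀ y, c y = c' y) (l : List String) :
    filtCnt c l = filtCnt c' l := by
  have : c = c' := funext h
  rw [this]

-- removing the first occurrence from a filtered list = filtering with the count bumped by one
theorem innerScan_filtCnt (f : String) (c : String → Nat) (l : List String) :
    pyInnerScanRemove f (filtCnt c l) = filtCnt (fun y => if y = f then c y + 1 else c y) l := by
  induction l generalizing c with
  | nil => rfl
  | cons x rest ih =>
    by_cases hx : c x = 0
    · by_cases hxf : x = f
      · subst hxf
        rw [filtCnt, if_neg (show ¬ c x ≠ 0 by omega)]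
        rw [show filtCnt (fun y => if y = x then c y + 1 else c y) (x :: rest)
              = filtCnt (fun y => if y = x then (if y = x then c y + 1 else c y) - 1
                  else (if y = x then c y + 1 else c y)) rest by
          rw [filtCnt, if_pos (by simp)]]
        rw [show pyInnerScanRemove x (x :: filtCnt c rest) = filtCnt c rest by
          simp [pyInnerScanRemove]]
        apply filtCnt_congr
        intro y; by_cases hyx : y = x <;> simp [hyx]
      · rw [filtCnt, if_neg (show ¬ c x ≠ 0 by omega)]
        rw [show filtCnt (fun y => if y = f then c y + 1 else c y) (x :: rest)
              = x :: filtCnt (fun y => if y = f then c y + 1 else c y) rest by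
          rw [filtCnt, if_neg (by simp [hxf, hx])]]
        rw [show pyInnerScanRemove f (x :: filtCnt c rest)
              = x :: pyInnerScanRemove f (filtCnt c rest) by
          simp [pyInnerScanRemove, Ne.symm hxf]]
        rw [ih]
    · have hx1 : 1 ≤ c x := by omega
      have hx' : (if x = f then c x + 1 else c x) ≠ 0 := by split <;> omega
      rw [filtCnt, if_pos (by omega : c x ≠ 0)]
      conv_rhs => rw [filtCnt, if_pos hx']
      rw [ih]
      apply filtCnt_congr
      intro y
      by_cases hyx : y = x
      · subst hyx; split_ifs <;> omega
      · simp only [if_neg hyx]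
-- A's outer loop computes filtCnt with the count of list1
theorem foldA_eq_filtCnt (list1 list2 : List String) :
    list1.foldl (fun acc f => pyInnerScanRemove f acc) list2
      = filtCnt (fun y => list1.count y) list2 := by
  induction list1 using List.reverseRecOn with
  | nil => simp [filtCnt_zero]
  | append_singleton l1 f ih =>
    rw [List.foldl_append, List.foldl_cons, List.foldl_nil, ih, innerScan_filtCnt]
    apply filtCnt_congr
    intro y
    by_cases h : y = f
    · simp [h, List.count_append]
    · simp [h, List.count_append, Ne.symm]

-- B's second pass computes filtCnt, given the dict tracks the Nat counter
theorem foldB_eq_filtCnt (l2 : List String) (d : PySem.Dict String Int)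
    (kept : List String) (c : String → Nat) (hinv : ∀ x, d.getD x 0 = (c x : Int)) :
    (l2.foldl bStep (d, kept)).2 = kept ++ filtCnt c l2 := by
  induction l2 generalizing d kept c with
  | nil => simp [filtCnt]
  | cons x rest ih =>
    by_cases hx : c x = 0
    · have hd : ¬ d.getD x 0 ≠ 0 := by rw [hinv, hx]; simp
      simp only [List.foldl_cons, bStep, if_neg hd]
      rw [filtCnt, if_neg (by omega : ¬ c x ≠ 0),
        ih d (kept ++ [x]) c hinv, List.append_assoc, List.singleton_append]
    · have hd : d.getD x 0 ≠ 0 := by rw [hinv]; exact_mod_cast hx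
      simp only [List.foldl_cons, bStep, if_pos hd]
      rw [filtCnt, if_pos (by omega : c x ≠ 0)]
      apply ih
      intro y
      rw [PySem.Dict.getD_insert]
      by_cases hyx : y = x
      · subst hyx; rw [if_pos rfl, if_pos rfl, hinv]; omega
      · rw [if_neg hyx, if_neg hyx, hinv]

-- ===== VERDICT (by name: the statement is the Claim_ definition above) =====
theorem double_list_check_spec : Claim_equal_double_list_check := by
  intro list1 list2 _
  unfold Spec_double_list_check double_list_check double_list_check_alt
  have hneed : ∀ x, (list1.foldl (fun d x => d.insert x (d.getD x 0 + 1))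
      (PySem.Dict.empty : PySem.Dict String Int)).getD x 0 = ((list1.count x : Nat) : Int) := by
    intro x
    rw [PySem.Dict.foldl_insert_getD_add_one_eq_counter, PySem.Dict.getD_counter]
  simp only [foldA_eq_filtCnt]
  rw [foldB_eq_filtCnt _ _ _ (fun y => list1.count y) hneed, List.nil_append]
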